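-- pv_equiv track=rewrite | github.com/avinashraghuthu/Arrays | partition_point_in_array.py | partition_point
-- ===== SOURCE A (Python) =====
-- def partition_point(arr, arr_len):
-- 	left_max = []
-- 	left_max.append(arr[0])
--
-- 	for i in range(1, arr_len):
-- 		left_max.insert(i, max(left_max[i-1], arr[i-1]))
--
-- 	i = arr_len - 1
-- 	right_min = arr[i]
-- 	while i >= 0:
-- 		if (arr[i] > left_max[i]) and arr[i] < right_min:
-- 			return i
-- 		right_min = min(right_min, arr[i])
-- 		i -= 1
-- 	return -1
-- ===== SOURCE B (Python) =====
-- def partition_point(arr, arr_len):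
--     n = arr_len
--     # Indices that strictly beat every earlier element ("left records"; index 0
--     # never qualifies, matching the original's left_max[0] = arr[0]).
--     records = []
--     m = arr[0]
--     for i in range(1, n):
--         if arr[i] > m:
--             records.append(i)
--             m = arr[i]
--     # Indices strictly below every later element ("right anti-records"; index
--     # n-1 never qualifies, matching the original's right_min seed arr[n-1]).
--     antis = []
--     rm = arr[n - 1]
--     for i in range(n - 2, -1, -1):
--         if arr[i] < rm:
--             antis.append(i)
--             rm = arr[i]
--     # A partition point is exactly an index in both families; the original's
--     # right-to-left first hit is the largest one.
--     good = set(records) & set(antis)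
--     return max(good, default=-1)
-- ===== Notes on version B (the rewrite author's own statement) =====
-- stated objective: alternative
-- what changed: A builds a prefix-max table (repeated list.insert) and scans right-to-left with a streamed suffix-min, returning on the first hit; B never consults a max/min table in a final scan: it collects the strict left-record indices and the strict right-anti-record indices in two independent passes, intersects the two sets, and returns max(intersection, default=-1), which is the rightmost partition point.
import Mathlib
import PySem

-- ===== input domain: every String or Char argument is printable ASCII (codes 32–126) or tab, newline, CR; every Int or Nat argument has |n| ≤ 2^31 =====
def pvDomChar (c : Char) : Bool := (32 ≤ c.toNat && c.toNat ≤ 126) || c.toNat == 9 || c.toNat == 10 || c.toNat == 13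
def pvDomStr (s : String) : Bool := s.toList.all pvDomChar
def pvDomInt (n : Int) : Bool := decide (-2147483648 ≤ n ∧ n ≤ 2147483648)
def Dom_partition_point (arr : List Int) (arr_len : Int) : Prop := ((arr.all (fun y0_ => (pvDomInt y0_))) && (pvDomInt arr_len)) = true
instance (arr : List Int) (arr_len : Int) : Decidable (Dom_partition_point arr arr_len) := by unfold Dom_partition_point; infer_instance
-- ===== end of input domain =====

-- B replaces A's table-plus-scan (prefix-max table consulted by a right-to-left scan with a
-- streamed suffix-min, first hit wins) by a record-intersection algorithm: collect the strict
-- left-record indices and the strict right-anti-record indices in two independent passes,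
-- intersect the two sets and take the maximum (default -1).  Same O(n) cost.

-- ===== PORT A =====
-- A's left_max table: left_max = [arr[0]]; for i in range(1, arr_len): insert at i
def ppA_table (arr : List Int) (n : Int) : List Int :=
  (PySem.List.pyRange 1 n 1).foldl
    (fun lm i => PySem.List.insert lm i
      (max (PySem.List.pyGetD lm (i - 1) 0) (PySem.List.pyGetD arr (i - 1) 0)))
    ([] ++ [PySem.List.pyGetD arr 0 0])

-- A's while loop: i counts down; fuel = (i+1).toNat is the exact iteration count
def ppA_loop (arr left_max : List Int) (i right_min : Int) : Nat → Int
  | 0 => -1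
  | fuel + 1 =>
    if PySem.List.pyGetD arr i 0 > PySem.List.pyGetD left_max i 0 ∧
       PySem.List.pyGetD arr i 0 < right_min then i
    else ppA_loop arr left_max (i - 1) (min right_min (PySem.List.pyGetD arr i 0)) fuel

def partition_point (arr : List Int) (arr_len : Int) : Int :=
  ppA_loop arr (ppA_table arr arr_len) (arr_len - 1)
    (PySem.List.pyGetD arr (arr_len - 1) 0) arr_len.toNat

-- ===== PORT B =====
-- B's first pass: left-record indices, state = (records, m)
def ppB_records (arr : List Int) (n : Int) : List Int × Int :=
  (PySem.List.pyRange 1 n 1).foldl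
    (fun p i => if PySem.List.pyGetD arr i 0 > p.2
                then (p.1 ++ [i], PySem.List.pyGetD arr i 0) else p)
    ([], PySem.List.pyGetD arr 0 0)

-- B's second pass: right-anti-record indices, state = (antis, rm)
def ppB_antis (arr : List Int) (n : Int) : List Int × Int :=
  (PySem.List.pyRange (n - 2) (-1) (-1)).foldl
    (fun p i => if PySem.List.pyGetD arr i 0 < p.2
                then (p.1 ++ [i], PySem.List.pyGetD arr i 0) else p)
    ([], PySem.List.pyGetD arr (n - 1) 0)

-- good = set(records) & set(antis); return max(good, default=-1)
def partition_point_alt (arr : List Int) (arr_len : Int) : Int :=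
  PySem.List.maxD
    (PySem.Set.inter (PySem.Set.ofList (ppB_records arr arr_len).1)
                     (PySem.Set.ofList (ppB_antis arr arr_len).1))
    (fun x => x) (-1)

-- ===== PRECONDITION & SPEC =====
-- Pre_ excludes exactly the inputs where the Python A raises IndexError: empty arr (arr[0]),
-- arr_len > len(arr) (arr[arr_len-1] past the end) and arr_len - 1 < -len(arr) (negative
-- index out of range).  A returns on everything admitted here, including arr_len ≤ 0.
def Pre_partition_point (arr : List Int) (arr_len : Int) : Prop :=
  arr ≠ [] ∧ 1 - (arr.length : Int) ≤ arr_len ∧ arr_len ≤ (arr.length : Int)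
instance (arr : List Int) (arr_len : Int) : Decidable (Pre_partition_point arr arr_len) := by
  unfold Pre_partition_point; infer_instance

def pvWitness_partition_point : List Int × Int := ([1, 3, 2, 4, 5], 5)

def Spec_partition_point (arr : List Int) (arr_len : Int) (out : Int) : Prop := out = partition_point_alt arr arr_len
instance (arr : List Int) (arr_len : Int) (out : Int) : Decidable (Spec_partition_point arr arr_len out) := by unfold Spec_partition_point; infer_instance

-- ===== CLAIM (what is proved, stated in full; the proofs are below) =====
def Claim_equal_partition_point : Prop := ∀ (arr : List Int) (arr_len : Int), Dom_partition_point arr arr_len → Pre_partition_point arr arr_len → Spec_partition_point arr arr_len (partition_point arr arr_len)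

-- ===== LEMMAS AND PROOFS =====

-- short name for arr[i] with default
def gA (arr : List Int) (i : Int) : Int := PySem.List.pyGetD arr i 0

-- pmF arr k = A's left_max[k] (= max of arr[0..k-1], with pmF 0 = arr[0])
def pmF (arr : List Int) : Nat → Int
  | 0 => gA arr 0
  | k + 1 => max (pmF arr k) (gA arr k)

-- smF arr n k = A's streamed right_min k steps after the start (= min of arr[n-1-k..n-1])
def smF (arr : List Int) (n : Int) : Nat → Int
  | 0 => gA arr (n - 1)
  | k + 1 => min (smF arr n k) (gA arr (n - 1 - k))

-- index m is a valid partition point (abbrev: decidability is found by unfolding)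
abbrev validP (arr : List Int) (n : Int) (m : Nat) : Prop :=
  pmF arr m < gA arr m ∧ gA arr m < smF arr n (n - 1 - m).toNat

-- reference: rightmost valid index among 0..m-1 (A's downward scan)
def refDown (arr : List Int) (n : Int) : Nat → Int
  | 0 => -1
  | m + 1 => if validP arr n m then (m : Int) else refDown arr n m

theorem valid_last_false (arr : List Int) (n : Int) (m : Nat) (hm : (m : Int) = n - 1) :
    ¬ validP arr n m := by
  intro h
  have h2 := h.2
  rw [show (n - 1 - (m : Int)).toNat = 0 by omega, smF, hm] at h2
  exact lt_irrefl _ h2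

-- ---- A side ----

theorem A_table (arr : List Int) (m : Nat) :
    ppA_table arr (1 + (m : Int)) = (List.range (m + 1)).map (pmF arr) := by
  induction m with
  | zero =>
    unfold ppA_table
    rw [show (1 + ((0 : Nat) : Int)) = 1 by norm_num, PySem.List.pyRange_one_eq_nil le_rfl]
    simp [pmF, gA]
  | succ k ih =>
    unfold ppA_table at ih ⊢
    rw [show (1 + ((k + 1 : Nat) : Int)) = (1 + (k : Int)) + 1 by push_cast; ring,
      PySem.List.pyRange_one_succ_right (by omega), List.foldl_append, ih,
      List.foldl_cons, List.foldl_nil,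
      show (1 + (k : Int)) - 1 = ((k : Nat) : Int) by ring]
    have hget : PySem.List.pyGetD ((List.range (k + 1)).map (pmF arr)) ((k : Nat) : Int) 0
        = pmF arr k := by
      rw [PySem.List.pyGetD_natCast, List.getD_eq_getElem _ _ (by simp)]
      simp
    rw [hget, show (1 + (k : Int)) = ((k + 1 : Nat) : Int) by push_cast; ring,
      PySem.List.insert_natCast _ _ _ (by simp)]
    rw [List.take_of_length_le (by simp), List.drop_eq_nil_of_le (by simp)]
    rw [List.range_succ (n := k + 1)]
    simp [pmF, gA]

theorem A_loop (arr lm : List Int) (n : Int)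
    (hlm : ∀ j : Int, 0 ≤ j → j < n → PySem.List.pyGetD lm j 0 = pmF arr j.toNat) :
    ∀ m : Nat, (m : Int) ≤ n →
      ppA_loop arr lm ((m : Int) - 1) (smF arr n (n - m).toNat) m = refDown arr n m := by
  intro m
  induction m with
  | zero => intro _; rfl
  | succ k ih =>
    intro hm
    have hk : (k : Int) < n := by push_cast at hm ⊢; omega
    rw [show ((k + 1 : Nat) : Int) - 1 = ((k : Nat) : Int) by push_cast; ring,
      show (n - ((k + 1 : Nat) : Int)) = n - 1 - (k : Int) by push_cast; ring,
      ppA_loop, hlm ((k : Nat) : Int) (by positivity) hk]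
    have hcond : (PySem.List.pyGetD arr ((k : Nat) : Int) 0 > pmF arr ((k : Nat) : Int).toNat ∧
        PySem.List.pyGetD arr ((k : Nat) : Int) 0 < smF arr n (n - 1 - (k : Int)).toNat)
        ↔ validP arr n k := by
      simp [validP, gA]
    rw [if_congr hcond rfl rfl, refDown]
    by_cases hv : validP arr n k
    · rw [if_pos hv, if_pos hv]
    · rw [if_neg hv, if_neg hv]
      have hsm : min (smF arr n (n - 1 - (k : Int)).toNat) (PySem.List.pyGetD arr ((k : Nat) : Int) 0)
          = smF arr n (n - (k : Int)).toNat := by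
        have h1 : (n - (k : Int)).toNat = (n - 1 - (k : Int)).toNat + 1 := by omega
        rw [h1, smF]
        have h2 : n - 1 - (((n - 1 - (k : Int)).toNat : Int)) = (k : Int) := by omega
        rw [h2]
        rfl
      rw [hsm]
      exact ih (by omega)

-- refDown is -1 or a valid index below m
theorem refDown_cases (arr : List Int) (n : Int) (m : Nat) :
    refDown arr n m = -1 ∨
      ∃ j : Nat, j < m ∧ validP arr n j ∧ refDown arr n m = (j : Int) := by
  induction m with
  | zero => exact Or.inl rfl
  | succ k ih =>
    rw [refDown]
    by_cases hv : validP arr n k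
    · exact Or.inr ⟨k, by omega, hv, by rw [if_pos hv]⟩
    · rw [if_neg hv]
      rcases ih with h | ⟨j, hj, hjv, hje⟩
      · exact Or.inl h
      · exact Or.inr ⟨j, by omega, hjv, hje⟩

-- refDown dominates every valid index below m
theorem refDown_ge (arr : List Int) (n : Int) (m : Nat) :
    ∀ j : Nat, j < m → validP arr n j → (j : Int) ≤ refDown arr n m := by
  induction m with
  | zero => intro j hj _; omega
  | succ k ih =>
    intro j hj hjv
    rw [refDown]
    by_cases hv : validP arr n k
    · rw [if_pos hv]
      exact_mod_cast Nat.lt_succ_iff.mp hj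
    · rw [if_neg hv]
      have hjk : j < k := by
        rcases Nat.lt_succ_iff_lt_or_eq.mp hj with h | h
        · exact h
        · exact absurd (h ▸ hjv) hv
      exact ih j hjk hjv

-- ---- B side ----

-- records after processing indices 1..j
def recList (arr : List Int) : Nat → List Int
  | 0 => []
  | j + 1 => recList arr j ++
      (if pmF arr (j + 1) < gA arr ((j : Int) + 1) then [(j : Int) + 1] else [])

-- antis after processing indices n-2 .. n-2-(j-1)
def antList (arr : List Int) (n : Int) : Nat → List Int
  | 0 => []
  | j + 1 => antList arr n j ++
      (if gA arr (n - 2 - (j : Int)) < smF arr n (j + 1) then [n - 2 - (j : Int)] else [])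

theorem B_records (arr : List Int) (j : Nat) :
    (PySem.List.pyRange 1 (1 + (j : Int)) 1).foldl
      (fun p i => if PySem.List.pyGetD arr i 0 > p.2
                  then (p.1 ++ [i], PySem.List.pyGetD arr i 0) else p)
      ([], PySem.List.pyGetD arr 0 0)
    = (recList arr j, pmF arr (j + 1)) := by
  induction j with
  | zero =>
    rw [show (1 + ((0 : Nat) : Int)) = 1 by norm_num, PySem.List.pyRange_one_eq_nil le_rfl]
    simp [recList, pmF, gA]
  | succ k ih =>
    rw [show (1 + ((k + 1 : Nat) : Int)) = (1 + (k : Int)) + 1 by push_cast; ring,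
      PySem.List.pyRange_one_succ_right (by omega), List.foldl_append, ih,
      List.foldl_cons, List.foldl_nil]
    have hg : PySem.List.pyGetD arr (1 + (k : Int)) 0 = gA arr ((k : Int) + 1) := by
      unfold gA; ring_nf
    have hpm : pmF arr (k + 1 + 1) = max (pmF arr (k + 1)) (gA arr ((k : Int) + 1)) := by
      rw [pmF, show (((k + 1 : Nat)) : Int) = (k : Int) + 1 by push_cast; ring]
    by_cases hc : pmF arr (k + 1) < gA arr ((k : Int) + 1)
    · rw [recList, if_pos hc]
      simp only [hg]
      rw [if_pos (by exact hc)]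
      refine Prod.ext ?_ ?_
      · simp [show (1 + (k : Int)) = (k : Int) + 1 by ring]
      · simp [hpm, max_eq_right (le_of_lt hc)]
    · rw [recList, if_neg hc]
      simp only [hg]
      rw [if_neg (by exact hc)]
      refine Prod.ext (by simp) ?_
      simp [hpm, max_eq_left (not_lt.mp hc)]

theorem B_antis (arr : List Int) (n : Int) (j : Nat) (hj : (j : Int) ≤ n - 1) :
    (PySem.List.pyRange (n - 2) (n - 2 - (j : Int)) (-1)).foldl
      (fun p i => if PySem.List.pyGetD arr i 0 < p.2
                  then (p.1 ++ [i], PySem.List.pyGetD arr i 0) else p)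
      ([], PySem.List.pyGetD arr (n - 1) 0)
    = (antList arr n j, smF arr n (j + 1)) := by
  induction j with
  | zero =>
    rw [show (n - 2 - ((0 : Nat) : Int)) = n - 2 by norm_num,
      PySem.List.pyRange_neg_one_eq_nil le_rfl]
    simp only [List.foldl_nil, antList]
    refine Prod.ext rfl ?_
    show PySem.List.pyGetD arr (n - 1) 0 = smF arr n 1
    rw [smF, smF]
    show gA arr (n - 1) = min (gA arr (n - 1)) (gA arr (n - 1 - 0))
    simp
  | succ k ih =>
    have hsplit : PySem.List.pyRange (n - 2) (n - 2 - ((k + 1 : Nat) : Int)) (-1)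
        = PySem.List.pyRange (n - 2) (n - 2 - (k : Int)) (-1) ++ [n - 2 - (k : Int)] := by
      rw [PySem.List.pyRange_neg_one, PySem.List.pyRange_neg_one,
        show ((n - 2) - (n - 2 - ((k + 1 : Nat) : Int))).toNat = k + 1 by push_cast; omega,
        show ((n - 2) - (n - 2 - (k : Int))).toNat = k by omega,
        List.range_succ]
      simp
    rw [hsplit, List.foldl_append, ih (by push_cast at hj ⊢; omega),
      List.foldl_cons, List.foldl_nil]
    have hsm : smF arr n (k + 1 + 1) = min (smF arr n (k + 1)) (gA arr (n - 2 - (k : Int))) := by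
      rw [smF]
      congr 1
      unfold gA; push_cast; ring_nf
    by_cases hc : gA arr (n - 2 - (k : Int)) < smF arr n (k + 1)
    · rw [antList, if_pos hc]
      simp only [show PySem.List.pyGetD arr (n - 2 - (k : Int)) 0 = gA arr (n - 2 - (k : Int)) from rfl]
      rw [if_pos (by exact hc)]
      exact Prod.ext (by simp) (by simp [hsm, min_eq_right (le_of_lt hc)])
    · rw [antList, if_neg hc]
      simp only [show PySem.List.pyGetD arr (n - 2 - (k : Int)) 0 = gA arr (n - 2 - (k : Int)) from rfl]
      rw [if_neg (by exact hc)]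
      exact Prod.ext (by simp) (by simp [hsm, min_eq_left (not_lt.mp hc)])

theorem mem_recList (arr : List Int) (j : Nat) (x : Int) :
    x ∈ recList arr j ↔ 1 ≤ x ∧ x ≤ (j : Int) ∧ pmF arr x.toNat < gA arr x := by
  induction j with
  | zero => simp [recList]; omega
  | succ k ih =>
    rw [recList]
    simp only [List.mem_append, ih]
    constructor
    · rintro (⟨h1, h2, h3⟩ | hx)
      · exact ⟨h1, by push_cast; omega, h3⟩
      · have hx' : x = (k : Int) + 1 := by
          by_cases hc : pmF arr (k + 1) < gA arr ((k : Int) + 1)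
          · simpa [hc] using hx
          · simp [hc] at hx
        have hc : pmF arr (k + 1) < gA arr ((k : Int) + 1) := by
          by_contra hc; simp [hc] at hx
        refine ⟨by omega, by push_cast; omega, ?_⟩
        rw [hx', show (((k : Int) + 1)).toNat = k + 1 by omega]
        exact hc
    · rintro ⟨h1, h2, h3⟩
      by_cases hxk : x ≤ (k : Int)
      · exact Or.inl ⟨h1, hxk, h3⟩
      · have hx' : x = (k : Int) + 1 := by push_cast at h2; omega
        have hc : pmF arr (k + 1) < gA arr ((k : Int) + 1) := by
          rw [hx', show (((k : Int) + 1)).toNat = k + 1 by omega] at h3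
          exact h3
        simp [hc, hx']

theorem mem_antList (arr : List Int) (n : Int) (j : Nat) (hj : (j : Int) ≤ n - 1) (x : Int) :
    x ∈ antList arr n j ↔
      n - 1 - (j : Int) ≤ x ∧ x ≤ n - 2 ∧ gA arr x < smF arr n (n - 1 - x).toNat := by
  induction j with
  | zero => simp [antList]; omega
  | succ k ih
  =>
    have hk : (k : Int) ≤ n - 1 := by push_cast at hj ⊢; omega
    rw [antList]
    simp only [List.mem_append, ih hk]
    have hnew : n - 1 - (n - 2 - (k : Int)) = (k : Int) + 1 := by ring
    constructor
    · rintro (⟨h1, h2, h3⟩ | hx)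
      · exact ⟨by push_cast; omega, h2, h3⟩
      · have hc : gA arr (n - 2 - (k : Int)) < smF arr n (k + 1) := by
          by_contra hc; simp [hc] at hx
        have hx' : x = n - 2 - (k : Int) := by simpa [hc] using hx
        refine ⟨by push_cast; omega, by omega, ?_⟩
        rw [hx', show (n - 1 - (n - 2 - (k : Int))).toNat = k + 1 by omega]
        exact hc
    · rintro ⟨h1, h2, h3⟩
      by_cases hxk : n - 1 - (k : Int) ≤ x
      · exact Or.inl ⟨hxk, h2, h3⟩
      · have hx' : x = n - 2 - (k : Int) := by push_cast at h1; omega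
        have hc : gA arr (n - 2 - (k : Int)) < smF arr n (k + 1) := by
          rw [hx', show (n - 1 - (n - 2 - (k : Int))).toNat = k + 1 by omega] at h3
          exact h3
        simp [hc, hx']

-- membership in B's intersection characterises the valid indices
theorem mem_good (arr : List Int) (n : Int) (hn : 1 ≤ n) (x : Int) :
    (x ∈ PySem.Set.inter (PySem.Set.ofList (ppB_records arr n).1)
                         (PySem.Set.ofList (ppB_antis arr n).1))
    ↔ 0 ≤ x ∧ x < n ∧ validP arr n x.toNat := by
  have hrec : (ppB_records arr n).1 = recList arr (n - 1).toNat := by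
    have hb := B_records arr (n - 1).toNat
    rw [show (1 + (((n - 1).toNat : Nat) : Int)) = n by omega] at hb
    unfold ppB_records
    rw [hb]
  have hant : (ppB_antis arr n).1 = antList arr n (n - 1).toNat := by
    have hb := B_antis arr n (n - 1).toNat (by omega)
    rw [show (n - 2 - (((n - 1).toNat : Nat) : Int)) = -1 by omega] at hb
    unfold ppB_antis
    rw [hb]
  rw [PySem.Set.mem_inter, PySem.Set.mem_ofList, PySem.Set.mem_ofList, hrec, hant,
    mem_recList, mem_antList arr n (n - 1).toNat (by omega)]
  constructor
  · rintro ⟨⟨h1, h2, h3⟩, _, h5, h6⟩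
    have hxx : ((x.toNat : Nat) : Int) = x := by omega
    refine ⟨by omega, by omega, ?_, ?_⟩
    · rw [hxx]; exact h3
    · rw [hxx]; exact h6
  · rintro ⟨h0, hlt, h3, h4⟩
    have hxx : ((x.toNat : Nat) : Int) = x := by omega
    rw [hxx] at h3 h4
    have hx0 : x ≠ 0 := by
      intro h
      rw [h] at h3
      simp [pmF] at h3
    have hxl : x ≠ n - 1 := by
      intro h
      refine valid_last_false arr n x.toNat (by omega) ?_
      unfold validP
      rw [hxx]
      exact ⟨h3, h4⟩
    exact ⟨⟨by omega, by omega, h3⟩, by omega, by omega, h4⟩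

-- max(good, default=-1) equals A's rightmost-valid reference
theorem maxD_good (arr : List Int) (n : Int) (hn : 1 ≤ n)
    (good : List Int)
    (hmem : ∀ x : Int, x ∈ good ↔ 0 ≤ x ∧ x < n ∧ validP arr n x.toNat) :
    PySem.List.maxD good (fun x => x) (-1) = refDown arr n n.toNat := by
  rcases good with _ | ⟨g, t⟩
  · -- no valid index at all
    rcases refDown_cases arr n n.toNat with h | ⟨j, hj, hjv, hje⟩
    · simpa [PySem.List.maxD, PySem.List.max?] using h.symm
    · exfalso
      have : (j : Int) ∈ ([] : List Int) := by
        rw [hmem]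
        exact ⟨by positivity, by omega, by simpa using hjv⟩
      simp at this
    -- (the nil case of max? is definitional)
  · unfold PySem.List.maxD
    rw [PySem.List.max?_id_cons, Option.getD_some]
    set M := t.foldl max g with hM
    have hMmem : M ∈ g :: t := by
      rcases PySem.List.foldl_max_mem t g with h | h
      · rw [hM, h]; exact List.mem_cons_self
      · exact List.mem_cons_of_mem _ h
    obtain ⟨hM0, hMn, hMv⟩ := (hmem M).mp hMmem
    have hMle : M ≤ refDown arr n n.toNat := by
      have := refDown_ge arr n n.toNat M.toNat (by omega) hMv
      omega
    have hge : refDown arr n n.toNat ≤ M := by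
      rcases refDown_cases arr n n.toNat with h | ⟨j, hj, hjv, hje⟩
      · omega
      · have hjmem : (j : Int) ∈ g :: t := by
          rw [hmem]
          exact ⟨by positivity, by omega, by simpa using hjv⟩
        rw [hje]
        rcases List.mem_cons.mp hjmem with h | h
        · rw [h, hM]; exact (PySem.List.le_foldl_max t g).1
        · exact (PySem.List.le_foldl_max t g).2 _ h
    omega

-- ===== VERDICT (by name: the statement is the Claim_ definition above) =====
theorem partition_point_spec : Claim_equal_partition_point := by
  intro arr n _ hpre
  obtain ⟨hne, hlow, hhigh⟩ := hpre
  unfold Spec_partition_point partition_point partition_point_alt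
  by_cases hn : n ≤ 0
  · rw [show n.toNat = 0 by omega]
    have hr : (ppB_records arr n).1 = [] := by
      unfold ppB_records
      rw [PySem.List.pyRange_one_eq_nil (by omega)]
      rfl
    have ha : (ppB_antis arr n).1 = [] := by
      unfold ppB_antis
      rw [PySem.List.pyRange_neg_one_eq_nil (by omega)]
      rfl
    rw [hr, ha]
    rfl
  · rw [not_le] at hn
    have hA : ppA_table arr n = (List.range n.toNat).map (pmF arr) := by
      have := A_table arr (n.toNat - 1)
      rw [show (1 + ((n.toNat - 1 : Nat) : Int)) = n by omega] at this
      rw [this, show n.toNat - 1 + 1 = n.toNat by omega]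
    rw [hA]
    have hlm : ∀ j : Int, 0 ≤ j → j < n →
        PySem.List.pyGetD ((List.range n.toNat).map (pmF arr)) j 0 = pmF arr j.toNat := by
      intro j hj0 hjn
      rw [PySem.List.pyGetD_eq_getElem _ 0 hj0 (by simp; omega)]
      simp
    have hAL := A_loop arr ((List.range n.toNat).map (pmF arr)) n hlm n.toNat (by omega)
    rw [show ((n.toNat : Nat) : Int) - 1 = n - 1 by omega,
      show (n - ((n.toNat : Nat) : Int)).toNat = 0 by omega] at hAL
    rw [show PySem.List.pyGetD arr (n - 1) 0 = smF arr n 0 from rfl, hAL]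
    exact (maxD_good arr n (by omega) _ (mem_good arr n (by omega))).symm
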